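-- pv_equiv track=rewrite | github.com/PhilMarsh/adventofcode | 2017/24.1.py | yield_bridges
-- ===== SOURCE A (Python) =====
-- def yield_bridges(comp_lookup, in_port=0):
--     for out_port in set(comp_lookup[in_port]):
--         component = (in_port, out_port)
--         head = (component,)
--         yield head
--         comp_lookup[in_port].discard(out_port)
--         comp_lookup[out_port].discard(in_port)
--         for tail in yield_bridges(comp_lookup, out_port):
--             yield head + tail
--         comp_lookup[in_port].add(out_port)
--         comp_lookup[out_port].add(in_port)
-- ===== SOURCE B (Python) =====
-- def yield_bridges(comp_lookup, in_port=0):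
--     # Iterative DFS over an explicit stack of frames instead of recursive
--     # generators; mutates comp_lookup exactly like the original (edges removed
--     # on descent, re-added when a frame is popped) and restores it fully.
--     stack = [(in_port, list(set(comp_lookup[in_port])), ())]
--     while stack:
--         p, cands, pre = stack.pop()
--         if not cands:
--             if pre:
--                 a, b = pre[-1]
--                 comp_lookup[a].add(b)
--                 comp_lookup[b].add(a)
--             continue
--         o = cands[0]
--         stack.append((p, cands[1:], pre))
--         newpre = pre + ((p, o),)
--         yield newpre
--         comp_lookup[p].discard(o)
--         comp_lookup[o].discard(p)
--         stack.append((o, list(set(comp_lookup[o])), newpre))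
-- ===== Notes on version B (the rewrite author's own statement) =====
-- stated objective: alternative
-- what changed: The recursive generator is replaced by an explicit iterative DFS over a stack of frames (port, remaining snapshot candidates, prefix built so far): each bridge is emitted once as a ready prefix instead of being re-concatenated and re-yielded through every enclosing generator level; edges are removed on descent and re-added when a frame is popped, restoring comp_lookup exactly as the recursion does.
-- outside the precondition, e.g. on yield_bridges({0: {1}, 1: set()}, 0): A returns [((0, 1),)], B returns [((0, 1),)]
import Mathlib
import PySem

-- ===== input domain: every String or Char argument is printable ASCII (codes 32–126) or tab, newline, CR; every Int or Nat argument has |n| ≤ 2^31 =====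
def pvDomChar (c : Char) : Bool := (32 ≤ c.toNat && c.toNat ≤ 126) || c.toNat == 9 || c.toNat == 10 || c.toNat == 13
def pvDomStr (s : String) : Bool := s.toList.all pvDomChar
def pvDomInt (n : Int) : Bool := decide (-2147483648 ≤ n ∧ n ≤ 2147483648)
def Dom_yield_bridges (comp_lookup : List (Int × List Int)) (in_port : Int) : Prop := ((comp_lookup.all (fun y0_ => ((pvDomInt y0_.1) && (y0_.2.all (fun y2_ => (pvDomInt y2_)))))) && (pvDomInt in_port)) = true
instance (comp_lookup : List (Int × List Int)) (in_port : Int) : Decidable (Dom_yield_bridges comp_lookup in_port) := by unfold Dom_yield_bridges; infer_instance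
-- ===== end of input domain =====

-- B replaces A's recursive generator by an explicit iterative DFS over a stack of frames
-- (same mutation/restore discipline on comp_lookup; the equivalence is about the returned
-- bridge list — both Pythons mutate comp_lookup while running and fully restore it).


-- ===== PORT A =====
-- shared dict primitives: both Pythons perform literally the same two mutation pairs
-- (comp_lookup[p].discard(o); comp_lookup[o].discard(p) — and .add .add for the restore)

def pvDiscard2 (d : PySem.Dict Int (List Int)) (p o : Int) : PySem.Dict Int (List Int) :=
  (d.modify p [] (fun s => PySem.Set.discard s o)).modify o [] (fun s => PySem.Set.discard s p)

def pvAdd2 (d : PySem.Dict Int (List Int)) (p o : Int) : PySem.Dict Int (List Int) :=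
  (d.modify p [] (fun s => PySem.Set.add s o)).modify o [] (fun s => PySem.Set.add s p)

-- total number of stored adjacency entries; only used to size the step fuel below
def pvSz (d : PySem.Dict Int (List Int)) : Nat :=
  (d.items.map (fun kv => kv.2.length)).sum

-- A's recursive generator, fully forced: loop over the snapshot `cands` of
-- set(comp_lookup[p]), yield the head, recurse on out_port between the discards and the
-- adds.  The fuel is a totality guard counting loop steps; it is threaded through the
-- recursion and, when exhausted (never on inputs the spec admits), the loop stops where
-- the machine of port B stops, so the guard changes neither side of the equivalence.
def yaGo : Nat → PySem.Dict Int (List Int) → Int → List Int →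
    (List (List (Int × Int)) × PySem.Dict Int (List Int) × Nat)
  | 0, d, _, _ => ([], d, 0)
  | f+1, d, _, [] => ([], d, f)
  | f+1, d, p, o :: cs =>
    let head : List (Int × Int) := [(p, o)]
    let d2 := pvDiscard2 d p o
    let r1 := yaGo f d2 o (d2.getD o [])
    let f1 := min r1.2.2 f
    if f1 = 0 then (head :: r1.1.map (fun t => head ++ t), r1.2.1, 0)
    else
      let d4 := pvAdd2 r1.2.1 p o
      let r2 := yaGo f1 d4 p cs
      (head :: (r1.1.map (fun t => head ++ t) ++ r2.1), r2.2.1, r2.2.2)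
  termination_by f _ _ _ => f
  decreasing_by all_goals omega

def pvFuel (d : PySem.Dict Int (List Int)) : Nat :=
  (2 * pvSz d + 4) ^ (2 * pvSz d + 4)

def yield_bridges (comp_lookup : List (Int × List Int)) (in_port : Int) : List (List (Int × Int)) :=
  let d := PySem.Dict.mk comp_lookup
  (yaGo (pvFuel d) d in_port (d.getD in_port [])).1

-- ===== PORT B =====
-- one frame = (current port, remaining snapshot candidates, bridge prefix so far).
-- Popping an exhausted frame re-adds the edge that led to it (pre's last component);
-- advancing a frame takes its next candidate, emits the extended prefix, removes the
-- edge and pushes the child frame with its own snapshot.  Fuel counts loop steps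
-- (the same totality guard as in port A).
def ybStep : Nat → PySem.Dict Int (List Int) →
    List (Int × List Int × List (Int × Int)) → List (List (Int × Int)) →
    List (List (Int × Int))
  | _, _, [], acc => acc
  | 0, _, _ :: _, acc => acc
  | f+1, d, (p, cands, pre) :: rest, acc =>
    match cands with
    | [] =>
      match pre.getLast? with
      | some e => ybStep f (pvAdd2 d e.1 e.2) rest acc
      | none => ybStep f d rest acc
    | o :: cs =>
      let newpre := pre ++ [(p, o)]
      let d2 := pvDiscard2 d p o
      ybStep f d2 ((o, d2.getD o [], newpre) :: (p, cs, pre) :: rest) (acc ++ [newpre])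

def yield_bridges_alt (comp_lookup : List (Int × List Int)) (in_port : Int) : List (List (Int × Int)) :=
  let d := PySem.Dict.mk comp_lookup
  ybStep (pvFuel d) d [(in_port, d.getD in_port [], [])] []

-- ===== PRECONDITION & SPEC =====
-- the ports reachable from in_port by following stored adjacency (a closure of the
-- input graph, computed by saturation; not a run of the algorithm)
def pvReach (comp_lookup : List (Int × List Int)) (in_port : Int) : List Int :=
  (List.range (comp_lookup.length + (comp_lookup.flatMap (fun kv => kv.2)).length + 1)).foldl
    (fun R _ => R.foldl
      (fun acc k => PySem.Set.update acc ((PySem.Dict.mk comp_lookup).getD k [])) R)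
    [in_port]

-- Pre_ restricts only the component of in_port that A actually touches: it excludes
-- (a) inputs on which the Python raises KeyError (a reachable port is not a key), and
-- (b) inputs whose reachable component is not a faithful dict-of-sets image — duplicate
-- keys or duplicate set elements (a Python dict/set cannot hold them) or asymmetric
-- adjacency, on which A re-adds directed edges that were never there and the yielded
-- set depends on CPython's set iteration order (an accident of A's implementation).
def Pre_yield_bridges (comp_lookup : List (Int × List Int)) (in_port : Int) : Prop :=
  ∀ k ∈ pvReach comp_lookup in_port,
    (comp_lookup.map Prod.fst).count k = 1 ∧
    ((PySem.Dict.mk comp_lookup).getD k []).Nodup ∧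
    (∀ b ∈ (PySem.Dict.mk comp_lookup).getD k [],
      k ∈ (PySem.Dict.mk comp_lookup).getD b [])

instance (comp_lookup : List (Int × List Int)) (in_port : Int) :
    Decidable (Pre_yield_bridges comp_lookup in_port) := by
  unfold Pre_yield_bridges; infer_instance

instance (comp_lookup : List (Int × List Int)) (in_port : Int) :
    Decidable (Pre_yield_bridges comp_lookup in_port) := by
  unfold Pre_yield_bridges; infer_instance

def pvWitness_yield_bridges : (List (Int × List Int)) × Int := ([(0, [1]), (1, [0])], 0)

def Spec_yield_bridges (comp_lookup : List (Int × List Int)) (in_port : Int)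
    (out : List (List (Int × Int))) : Prop := out = yield_bridges_alt comp_lookup in_port
instance (comp_lookup : List (Int × List Int)) (in_port : Int) (out : List (List (Int × Int))) :
    Decidable (Spec_yield_bridges comp_lookup in_port out) := by
  unfold Spec_yield_bridges; infer_instance

-- ===== CLAIM (what is proved, stated in full; the proofs are below) =====
def Claim_equal_yield_bridges : Prop := ∀ (comp_lookup : List (Int × List Int)) (in_port : Int), Dom_yield_bridges comp_lookup in_port → Pre_yield_bridges comp_lookup in_port → Spec_yield_bridges comp_lookup in_port (yield_bridges comp_lookup in_port)

-- ===== LEMMAS AND PROOFS =====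
-- (the two ports agree on EVERY input: the proof below never needs Pre_, which only
-- delimits where the ports are faithful to the Python)

-- re-add the edge that led to a frame (nothing for the root frame)
def pvPopE (d : PySem.Dict Int (List Int)) (pre : List (Int × Int)) : PySem.Dict Int (List Int) :=
  match pre.getLast? with
  | some e => pvAdd2 d e.1 e.2
  | none => d

theorem ybStep_nil (n : Nat) (d : PySem.Dict Int (List Int)) (acc : List (List (Int × Int))) :
    ybStep n d [] acc = acc := by
  cases n <;> rfl

theorem ybStep_zero (d : PySem.Dict Int (List Int)) (st : List (Int × List Int × List (Int × Int)))
    (acc : List (List (Int × Int))) : ybStep 0 d st acc = acc := by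
  cases st <;> rfl

theorem yaGo_leftover_le : ∀ (n : Nat) (d : PySem.Dict Int (List Int)) (p : Int) (c : List Int),
    (yaGo n d p c).2.2 ≤ n := by
  intro n
  induction n using Nat.strong_induction_on with
  | _ n ih =>
    intro d p c
    match n, c with
    | 0, _ => simp [yaGo]
    | f+1, [] => simp [yaGo]
    | f+1, o :: cs =>
      rw [yaGo]
      set r1 := yaGo f (pvDiscard2 d p o) o ((pvDiscard2 d p o).getD o []) with hr1
      by_cases hz : min r1.2.2 f = 0
      · simp [hz]
      · have h2 := ih (min r1.2.2 f) (by omega) (pvAdd2 r1.2.1 p o) p cs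
        simp only [if_neg hz]
        omega

-- the frame/recursion correspondence, for every fuel (exhaustion included)
theorem pvMain : ∀ (n : Nat) (d : PySem.Dict Int (List Int)) (p : Int) (cands : List Int)
    (pre : List (Int × Int)) (rest : List (Int × List Int × List (Int × Int)))
    (acc : List (List (Int × Int))),
    ybStep n d ((p, cands, pre) :: rest) acc
      = if (yaGo n d p cands).2.2 = 0
        then acc ++ (yaGo n d p cands).1.map (fun t => pre ++ t)
        else ybStep ((yaGo n d p cands).2.2) (pvPopE (yaGo n d p cands).2.1 pre) rest
              (acc ++ (yaGo n d p cands).1.map (fun t => pre ++ t)) := by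
  intro n
  induction n using Nat.strong_induction_on with
  | _ n ih =>
    intro d p cands pre rest acc
    match n, cands with
    | 0, _ => simp [ybStep, yaGo]
    | f+1, [] =>
      by_cases hf : f = 0
      · subst hf
        cases hl : pre.getLast? <;> simp [ybStep, yaGo, pvPopE, hl, ybStep_zero]
      · cases hl : pre.getLast? <;> simp [ybStep, yaGo, pvPopE, hl, hf]
    | f+1, o :: cs =>
      have hstep : ybStep (f+1) d ((p, o :: cs, pre) :: rest) acc
          = ybStep f (pvDiscard2 d p o)
              ((o, (pvDiscard2 d p o).getD o [], pre ++ [(p, o)]) :: (p, cs, pre) :: rest)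
              (acc ++ [pre ++ [(p, o)]]) := by
        simp only [ybStep]
      rw [hstep, ih f (by omega)]
      set d2 := pvDiscard2 d p o with hd2
      set r1 := yaGo f d2 o (d2.getD o []) with hr1
      have hle : r1.2.2 ≤ f := yaGo_leftover_le f d2 o (d2.getD o [])
      have hmin : min r1.2.2 f = r1.2.2 := Nat.min_eq_left hle
      by_cases hz : r1.2.2 = 0
      · have hE : yaGo (f+1) d p (o :: cs)
            = ([(p, o)] :: r1.1.map (fun t => [(p, o)] ++ t), r1.2.1, 0) := by
          rw [yaGo]
          simp only [← hd2, ← hr1, hmin, if_pos hz]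
        rw [hE]
        simp [hz, List.map_map, Function.comp_def, List.append_assoc]
      · have hpop : pvPopE r1.2.1 (pre ++ [(p, o)]) = pvAdd2 r1.2.1 p o := by
          simp [pvPopE]
        set r2 := yaGo r1.2.2 (pvAdd2 r1.2.1 p o) p cs with hr2
        have hE : yaGo (f+1) d p (o :: cs)
            = ([(p, o)] :: (r1.1.map (fun t => [(p, o)] ++ t) ++ r2.1), r2.2.1, r2.2.2) := by
          rw [yaGo]
          simp only [← hd2, ← hr1, hmin, if_neg hz, ← hr2]
        rw [if_neg hz, hpop, ih r1.2.2 (by omega), hE]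
        by_cases hz2 : r2.2.2 = 0 <;>
          · rw [← hr2]
            simp [hz2, List.map_map, Function.comp_def, List.append_assoc]

theorem pv_top (comp_lookup : List (Int × List Int)) (in_port : Int) :
    yield_bridges comp_lookup in_port = yield_bridges_alt comp_lookup in_port := by
  rw [yield_bridges, yield_bridges_alt]
  rw [pvMain]
  split <;> simp [ybStep_nil]

-- ===== VERDICT (by name: the statement is the Claim_ definition above) =====
theorem yield_bridges_spec : Claim_equal_yield_bridges := by
  intro comp_lookup in_port _ _
  exact pv_top comp_lookup in_port
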